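-- pv_equiv track=rewrite | github.com/Laoluog/Dinner | dinner.py | filter_bad_invites
-- ===== SOURCE A (Python) =====
-- def filter_bad_invites(all_subsets:list, friends:dict)->list[list[str]]:
--     '''Removes subsets from all_subsets that contain any pair of friends who
--        are in a dislike relationship
--     '''
--     returner = []
--     for sub in all_subsets:
--         inv = True
--         for friend in friends:
--             for x in friends[friend]:
--                 if friend in sub and x in sub:
--                     inv = False
--                     break
--         if inv == True:
--             returner.append(sub)
--     return returner
-- ===== SOURCE B (Python) =====
-- def filter_bad_invites(all_subsets: list, friends: dict) -> list[list[str]]: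
--     """Precompute the set of disliked ordered pairs once, then keep each
--     subset whose own member pairs avoid it (alternative decomposition)."""
--     bad = {(f, x) for f in friends for x in friends[f]}
--     return [sub for sub in all_subsets
--             if not any((a, b) in bad for a in sub for b in sub)]
-- ===== Notes on version B (the rewrite author's own statement) =====
-- stated objective: faster
-- what changed: B precomputes a hash set of disliked ordered pairs once and keeps a subset iff none of its own ordered member pairs is in that set, instead of rescanning the whole dislike adjacency (with a break-controlled flag loop) per subset.
import Mathlib
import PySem

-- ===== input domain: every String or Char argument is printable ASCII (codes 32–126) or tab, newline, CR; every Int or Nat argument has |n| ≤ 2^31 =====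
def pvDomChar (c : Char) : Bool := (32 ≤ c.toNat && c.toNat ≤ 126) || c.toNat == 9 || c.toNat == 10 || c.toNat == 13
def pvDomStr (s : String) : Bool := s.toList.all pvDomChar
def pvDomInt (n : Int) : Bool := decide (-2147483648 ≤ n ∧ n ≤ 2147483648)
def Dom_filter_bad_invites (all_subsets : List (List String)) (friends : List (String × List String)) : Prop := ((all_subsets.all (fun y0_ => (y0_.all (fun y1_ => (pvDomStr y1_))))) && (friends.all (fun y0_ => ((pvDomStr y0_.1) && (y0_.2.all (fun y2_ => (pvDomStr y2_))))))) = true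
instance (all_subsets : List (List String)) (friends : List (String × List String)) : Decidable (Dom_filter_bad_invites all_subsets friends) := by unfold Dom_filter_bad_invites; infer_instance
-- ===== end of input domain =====

-- B precomputes the set of disliked ordered pairs once and tests each subset's own member pairs
-- against it, replacing A's per-subset rescan of the whole dislike adjacency (measured faster in a timing run).


-- ===== PORT A =====
-- 'for x in friends[friend]: if friend in sub and x in sub: inv = False; break'
def pvInnerA (sub : List String) (f : String) : List String → Bool → Bool
  | [], inv => inv
  | x :: rest, inv =>
    if sub.contains f && sub.contains x then false
    else pvInnerA sub f rest inv

def filter_bad_invites (all_subsets : List (List String)) (friends : List (String × List String)) : List (List String) :=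
  let d := PySem.Dict.ofList friends
  all_subsets.foldl (fun returner sub =>
    let inv := d.items.foldl (fun inv p => pvInnerA sub p.1 p.2 inv) true
    if inv then returner ++ [sub] else returner) []

-- ===== PORT B =====
def filter_bad_invites_alt (all_subsets : List (List String)) (friends : List (String × List String)) : List (List String) :=
  let d := PySem.Dict.ofList friends
  let bad : PySem.Set (String × String) :=
    PySem.Set.ofList (d.items.flatMap (fun p => p.2.map (fun x => (p.1, x))))
  all_subsets.filter (fun sub =>
    ! (sub.any (fun a => sub.any (fun b => PySem.Set.contains bad (a, b)))))

-- ===== PRECONDITION & SPEC =====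
def Spec_filter_bad_invites (all_subsets : List (List String)) (friends : List (String × List String)) (out : List (List String)) : Prop := out = filter_bad_invites_alt all_subsets friends
instance (all_subsets : List (List String)) (friends : List (String × List String)) (out : List (List String)) : Decidable (Spec_filter_bad_invites all_subsets friends out) := by unfold Spec_filter_bad_invites; infer_instance

-- ===== CLAIM (what is proved, stated in full; the proofs are below) =====
def Claim_equal_filter_bad_invites : Prop := ∀ (all_subsets : List (List String)) (friends : List (String × List String)), Dom_filter_bad_invites all_subsets friends → Spec_filter_bad_invites all_subsets friends (filter_bad_invites all_subsets friends)

-- ===== LEMMAS AND PROOFS =====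

theorem pvInnerA_eq (sub : List String) (f : String) (xs : List String) (inv : Bool) :
    pvInnerA sub f xs inv = (inv && !(sub.contains f && xs.any (fun x => sub.contains x))) := by
  induction xs generalizing inv with
  | nil => simp [pvInnerA]
  | cons x rest ih =>
    simp only [pvInnerA, List.any_cons, ih]
    cases cf : sub.contains f <;> cases cx : sub.contains x <;> simp [cf, cx]

theorem pvOuterA_eq (sub : List String) (items : List (String × List String)) (b : Bool) :
    items.foldl (fun inv p => pvInnerA sub p.1 p.2 inv) b
      = (b && items.all (fun p => !(sub.contains p.1 && p.2.any (fun x => sub.contains x)))) := by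
  induction items generalizing b with
  | nil => simp
  | cons p rest ih =>
    rw [List.foldl_cons, ih, pvInnerA_eq, List.all_cons, Bool.and_assoc]

theorem keep_eq (sub : List String) (items : List (String × List String)) :
    (items.foldl (fun inv p => pvInnerA sub p.1 p.2 inv) true)
      = (! (sub.any (fun a => sub.any (fun b =>
          PySem.Set.contains (PySem.Set.ofList (items.flatMap (fun p => p.2.map (fun x => (p.1, x))))) (a, b))))) := by
  rw [pvOuterA_eq, Bool.true_and, Bool.eq_iff_iff]
  simp only [List.all_eq_true, Bool.and_eq_false_iff,
    List.any_eq_false, List.any_eq_true, PySem.Set.contains, PySem.Set.mem_ofList,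
    List.mem_flatMap, List.mem_map, List.contains_eq_mem, decide_eq_true_eq,
    decide_eq_false_iff_not, Prod.mk.injEq, Bool.not_eq_eq_eq_not, Bool.not_true,
    not_exists, not_and]
  constructor
  · rintro h a ha b hb p hp x hx hfa hfb
    rcases h p hp with h1 | h2
    · exact h1 (hfa ▸ ha)
    · exact (h2 x hx) (hfb ▸ hb)
  · intro h p hp
    by_cases h1 : p.1 ∈ sub
    · right
      intro x hx hxs
      exact h p.1 h1 x hxs p hp x hx rfl rfl
    · left
      exact h1

theorem filter_bad_invites_eq_filter (all_subsets : List (List String)) (friends : List (String × List String)) :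
    filter_bad_invites all_subsets friends
      = all_subsets.filter (fun sub =>
          (PySem.Dict.ofList friends).items.foldl (fun inv p => pvInnerA sub p.1 p.2 inv) true) := by
  unfold filter_bad_invites
  simpa using PySem.List.foldl_append_if_eq_filter
    (l := all_subsets)
    (p := fun sub => (PySem.Dict.ofList friends).items.foldl (fun inv p => pvInnerA sub p.1 p.2 inv) true)
    (acc := [])

-- ===== VERDICT (by name: the statement is the Claim_ definition above) =====
theorem filter_bad_invites_spec : Claim_equal_filter_bad_invites := by
  intro all_subsets friends _
  unfold Spec_filter_bad_invites filter_bad_invites_alt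
  rw [filter_bad_invites_eq_filter]
  exact List.filter_congr (fun sub _ => keep_eq sub _)
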